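-- pv_equiv track=rewrite | github.com/cloverchio/wingwatch | wingwatch/partition.py | find_partition_ranges
-- ===== SOURCE A (Python) =====
-- def find_partition_ranges(data_size, partition_count):
--     partition_size, remainder = divmod(data_size, partition_count)
--     partition_ranges = []
--     starting_offset = 0
--     for i in range(partition_count):
--         ending_offset = starting_offset + partition_size + (1 if i < remainder else 0)
--         partition_ranges.append((starting_offset, ending_offset))
--         starting_offset = ending_offset
--     return partition_ranges
-- ===== SOURCE B (Python) =====
-- def find_partition_ranges(data_size, partition_count):
--     partition_size, remainder = divmod(data_size, partition_count)
--     return [(i * partition_size + min(i, remainder),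
--              (i + 1) * partition_size + min(i + 1, remainder))
--             for i in range(partition_count)]
-- ===== Notes on version B (the rewrite author's own statement) =====
-- stated objective: alternative
-- what changed: Replaced the sequential accumulator loop (each start copied from the previous end) by a closed-form per-index formula start_i = i*q + min(i, r) computed independently for each i from divmod's quotient and remainder.
import Mathlib
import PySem

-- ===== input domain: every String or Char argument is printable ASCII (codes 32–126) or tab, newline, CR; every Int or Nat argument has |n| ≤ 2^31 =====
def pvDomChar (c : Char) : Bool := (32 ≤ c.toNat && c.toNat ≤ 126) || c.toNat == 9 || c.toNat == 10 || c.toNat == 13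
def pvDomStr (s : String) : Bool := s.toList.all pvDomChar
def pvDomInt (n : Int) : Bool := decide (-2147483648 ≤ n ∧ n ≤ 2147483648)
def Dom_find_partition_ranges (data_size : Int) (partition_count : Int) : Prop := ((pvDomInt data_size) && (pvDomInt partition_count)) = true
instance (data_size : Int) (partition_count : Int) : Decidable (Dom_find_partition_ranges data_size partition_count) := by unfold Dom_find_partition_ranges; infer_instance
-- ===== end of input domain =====

-- B replaces A's sequential offset accumulator with a closed-form per-index formula
-- (start_i = i*q + min(i, r)); same cost, different decomposition.


-- ===== PORT A =====
def find_partition_ranges (data_size : Int) (partition_count : Int) : List (Int × Int) :=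
  match PySem.Int.divmod? data_size partition_count with
  | none => []    -- ZeroDivisionError; excluded by Pre_
  | some (partition_size, remainder) =>
    let st := (PySem.List.pyRange 0 partition_count 1).foldl
      (fun (st : List (Int × Int) × Int) i =>
        let ending_offset := st.2 + partition_size + (if i < remainder then 1 else 0)
        (st.1 ++ [(st.2, ending_offset)], ending_offset))
      ([], 0)
    st.1

-- ===== PORT B =====
def find_partition_ranges_alt (data_size : Int) (partition_count : Int) : List (Int × Int) :=
  match PySem.Int.divmod? data_size partition_count with
  | none => []    -- ZeroDivisionError; excluded by Pre_
  | some (partition_size, remainder) =>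
    (PySem.List.pyRange 0 partition_count 1).map
      (fun i => (i * partition_size + min i remainder,
                 (i + 1) * partition_size + min (i + 1) remainder))

-- ===== PRECONDITION & SPEC =====
-- Pre_ excludes only partition_count = 0, where Python A raises ZeroDivisionError.
def Pre_find_partition_ranges (data_size : Int) (partition_count : Int) : Prop :=
  partition_count ≠ 0
instance (data_size : Int) (partition_count : Int) : Decidable (Pre_find_partition_ranges data_size partition_count) := by unfold Pre_find_partition_ranges; infer_instance

def pvWitness_find_partition_ranges : Int × Int := (10, 3)

def Spec_find_partition_ranges (data_size : Int) (partition_count : Int) (out : List (Int × Int)) : Prop := out = find_partition_ranges_alt data_size partition_count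
instance (data_size : Int) (partition_count : Int) (out : List (Int × Int)) : Decidable (Spec_find_partition_ranges data_size partition_count out) := by unfold Spec_find_partition_ranges; infer_instance

-- ===== CLAIM (what is proved, stated in full; the proofs are below) =====
def Claim_equal_find_partition_ranges : Prop := ∀ (data_size : Int) (partition_count : Int), Dom_find_partition_ranges data_size partition_count → Pre_find_partition_ranges data_size partition_count → Spec_find_partition_ranges data_size partition_count (find_partition_ranges data_size partition_count)

-- ===== LEMMAS AND PROOFS =====

-- Loop invariant: starting at offset a*q + min a r, the fold over pyRange a b 1 appends
-- exactly the closed-form pairs and ends at offset (max a b)*q + min (max a b) r.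
theorem fpr_fold_inv (q r b : Int) : ∀ (n : Nat) (a : Int), (b - a).toNat = n →
    ∀ (acc : List (Int × Int)),
    (PySem.List.pyRange a b 1).foldl
      (fun (st : List (Int × Int) × Int) i =>
        let e := st.2 + q + (if i < r then 1 else 0)
        (st.1 ++ [(st.2, e)], e))
      (acc, a * q + min a r)
    = (acc ++ (PySem.List.pyRange a b 1).map
        (fun i => (i * q + min i r, (i + 1) * q + min (i + 1) r)),
       (max a b) * q + min (max a b) r) := by
  intro n
  induction n with
  | zero =>
    intro a ha acc
    have hba : b ≤ a := by omega
    rw [PySem.List.pyRange_one_eq_nil hba]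
    have : max a b = a := by omega
    simp [this]
  | succ m ih =>
    intro a ha acc
    have hab : a < b := by omega
    rw [PySem.List.pyRange_one_cons hab]
    simp only [List.foldl_cons, List.map_cons]
    have hstep : a * q + min a r + q + (if a < r then 1 else 0)
        = (a + 1) * q + min (a + 1) r := by
      split_ifs with h <;> [skip; skip] <;> (rw [add_one_mul]; omega)
    have hmax : max a b = max (a + 1) b := by omega
    rw [hstep]
    rw [ih (a + 1) (by omega) (acc ++ [(a * q + min a r, (a + 1) * q + min (a + 1) r)])]
    simp [hmax]

theorem find_partition_ranges_spec : Claim_equal_find_partition_ranges := by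
  intro data_size partition_count _ hpre
  unfold Spec_find_partition_ranges find_partition_ranges find_partition_ranges_alt
  cases hdm : PySem.Int.divmod? data_size partition_count with
  | none => rfl
  | some qr =>
    obtain ⟨q, r⟩ := qr
    simp only
    rcases lt_trichotomy partition_count 0 with hneg | hz | hpos
    · rw [PySem.List.pyRange_one_eq_nil (by omega)]
      simp
    · exact absurd hz hpre
    · -- 0 ≤ r since the divisor is positive
      have hq : q = PySem.Int.floordiv data_size partition_count ∧
                r = PySem.Int.mod data_size partition_count := by
        simp [PySem.Int.divmod?] at hdm
        exact ⟨hdm.2.1.symm, hdm.2.2.symm⟩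
      have hr : 0 ≤ r := hq.2 ▸ PySem.Int.mod_nonneg _ hpos
      have h0 : (0 : Int) * q + min 0 r = 0 := by omega
      have := fpr_fold_inv q r partition_count partition_count.toNat 0 (by omega) []
      rw [h0] at this
      rw [this]
      simp

-- must be last: verdict theorem only (already above)
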